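-- pv_equiv track=rewrite | github.com/josephbill/CodilityAssessmentsStudies | 93codility/shortestboardlength.py | solution
-- ===== SOURCE A (Python) =====
-- def solution(A):
--     # Implement your solution here
--     # helper function to check if i can cover all holes using a bisection search
--     def can_i_cover_all_holes(mid):
--         need_boards = 0
--         last_index = A[0]
--
--         for position in A:
--             #check if distance between the current position and last position is
--             #greater than mid point
--             if position - last_index > mid:
--                 need_boards += 1
--                 last_index = position
--
--         return need_boards
--     #sort for binary search
--     A.sort()
--     #intial low and high bounds for search
--     low, high = 1, A[-1] - A[0] + 1
--     #perfoming search for shortest board length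
--     while low < high:
--         mid = (low + high) // 2
--
--         if can_i_cover_all_holes(mid) <= 1:
--             high = mid
--         else:
--             low = mid + 1
--
--     return low
-- ===== SOURCE B (Python) =====
-- def solution(A):
--     # linear scan over adjacent split points after sorting (mutates A in place like the original)
--     A.sort()
--     if len(A) < 2:
--         return 1
--     first, last = A[0], A[-1]
--     best = last - first
--     for x, y in zip(A, A[1:]):
--         cand = max(x - first, last - y)
--         if cand < best:
--             best = cand
--     return max(1, best)
-- ===== Notes on version B (the rewrite author's own statement) =====
-- stated objective: faster
-- what changed: Replaced the binary search over board lengths (each step re-running the greedy cover check over the whole list) by a single linear scan over adjacent split points after sorting, taking the minimum over splits of the larger of the two group spans.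
-- outside the precondition, e.g. on solution([]): A raises IndexError, B returns 1
import Mathlib
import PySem

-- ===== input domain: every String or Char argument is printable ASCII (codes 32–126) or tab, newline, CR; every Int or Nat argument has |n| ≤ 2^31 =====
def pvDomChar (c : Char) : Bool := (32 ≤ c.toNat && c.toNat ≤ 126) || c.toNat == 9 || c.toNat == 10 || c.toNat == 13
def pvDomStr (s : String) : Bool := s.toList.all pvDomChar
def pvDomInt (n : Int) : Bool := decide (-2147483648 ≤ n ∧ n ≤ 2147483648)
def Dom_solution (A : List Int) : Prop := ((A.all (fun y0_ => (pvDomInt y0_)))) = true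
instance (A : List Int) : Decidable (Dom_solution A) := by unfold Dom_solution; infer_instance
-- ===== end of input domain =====

-- B replaces A's binary search over board lengths by one linear scan over adjacent split points
-- after sorting (objective: faster). Both A and B sort their argument in place in Python; the
-- equivalence proved here is about the RETURN value (both perform the same mutation).

-- ===== PORT A =====
-- can_i_cover_all_holes(mid), reading the (already sorted) list As; A[0] is pyGetD (Pre_ excludes [])
def pvCanCover (As : List Int) (mid : Int) : Int :=
  (As.foldl
    (fun (st : Int × Int) position =>
      if position - st.2 > mid then (st.1 + 1, position) else st)
    (0, PySem.List.pyGetD As 0 0)).1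

-- the 'while low < high' binary-search loop
def pvSearch (As : List Int) (low high : Int) : Int :=
  if h : low < high then
    let mid := PySem.Int.floordiv (low + high) 2
    if pvCanCover As mid ≤ 1 then pvSearch As low mid
    else pvSearch As (mid + 1) high
  else low
termination_by (high - low).toNat
decreasing_by
  · have hup := (PySem.Int.floordiv_lt_iff_lt_mul (a := low + high) (q := high) (by omega : (0:Int) < 2)).mpr (by omega)
    omega
  · have hlo := (PySem.Int.le_floordiv_iff_mul_le (a := low + high) (q := low) (by omega : (0:Int) < 2)).mpr (by omega)
    omega

def solution (A : List Int) : Int :=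
  let As := PySem.List.sorted A (fun x => x)
  pvSearch As 1 (PySem.List.pyGetD As (-1) 0 - PySem.List.pyGetD As 0 0 + 1)

-- ===== PORT B =====
def solution_alt (A : List Int) : Int :=
  let As := PySem.List.sorted A (fun x => x)
  if As.length < 2 then 1
  else
    let first := PySem.List.pyGetD As 0 0
    let last := PySem.List.pyGetD As (-1) 0
    let best := (As.zip (PySem.List.slice As (some 1) none)).foldl
      (fun best p =>
        let cand := max (p.1 - first) (last - p.2)
        if cand < best then cand else best)
      (last - first)
    max 1 best

-- ===== PRECONDITION & SPEC =====
-- Pre_ excludes only the empty list, on which Python's A raises IndexError (A[-1]).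
def Pre_solution (A : List Int) : Prop := A ≠ []
instance (A : List Int) : Decidable (Pre_solution A) := by unfold Pre_solution; infer_instance
def pvWitness_solution : List Int := [3, 1, 2]

def Spec_solution (A : List Int) (out : Int) : Prop := out = solution_alt A
instance (A : List Int) (out : Int) : Decidable (Spec_solution A out) := by unfold Spec_solution; infer_instance

-- ===== CLAIM (what is proved, stated in full; the proofs are below) =====
def Claim_equal_solution : Prop := ∀ (A : List Int), Dom_solution A → Pre_solution A → Spec_solution A (solution A)

-- ===== LEMMAS AND PROOFS =====

-- greedy reset count of A's cover check, as a structural recursion (proof-side view of the fold)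
def pvG (m l : Int) : List Int → Int
  | [] => 0
  | x :: xs => if x - l > m then 1 + pvG m x xs else pvG m l xs

lemma pvG_fold (mid : Int) : ∀ (xs : List Int) (c l : Int),
    (xs.foldl (fun (st : Int × Int) position =>
      if position - st.2 > mid then (st.1 + 1, position) else st) (c, l)).1 = c + pvG mid l xs := by
  intro xs
  induction xs with
  | nil => intro c l; simp [pvG]
  | cons x xs ih =>
    intro c l
    by_cases h : x - l > mid
    · simp only [List.foldl_cons, if_pos h, pvG, ih]; omega
    · simp only [List.foldl_cons, if_neg h, pvG, ih]

lemma pvCanCover_eq (As : List Int) (m : Int) :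
    pvCanCover As m = pvG m (PySem.List.pyGetD As 0 0) As := by
  unfold pvCanCover
  rw [pvG_fold m As 0 (PySem.List.pyGetD As 0 0)]
  omega

lemma pvG_nonneg (m : Int) : ∀ (l : Int) (xs : List Int), 0 ≤ pvG m l xs := by
  intro l xs
  induction xs generalizing l with
  | nil => simp [pvG]
  | cons x xs ih =>
    simp only [pvG]
    split_ifs with h
    · have := ih x; omega
    · exact ih l

lemma pvG_eq_zero_iff (m : Int) : ∀ (l : Int) (xs : List Int),
    pvG m l xs = 0 ↔ ∀ x ∈ xs, x - l ≤ m := by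
  intro l xs
  induction xs generalizing l with
  | nil => simp [pvG]
  | cons x xs ih =>
    simp only [pvG, List.mem_cons]
    split_ifs with h
    · have h1 := pvG_nonneg m x xs
      constructor
      · intro hc; omega
      · intro hc; exact absurd (hc x (Or.inl rfl)) (by omega)
    · rw [ih l]
      constructor
      · intro hc y hy; rcases hy with rfl | hy
        · omega
        · exact hc y hy
      · intro hc y hy; exact hc y (Or.inr hy)

lemma pvG_skip (m l : Int) : ∀ (p q : List Int), (∀ x ∈ p, x - l ≤ m) →
    pvG m l (p ++ q) = pvG m l q := by
  intro p q hp
  induction p with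
  | nil => rfl
  | cons u p ih =>
    have hu : u - l ≤ m := hp u (by simp)
    simp only [List.cons_append, pvG, if_neg (by omega : ¬ u - l > m)]
    exact ih (fun x hx => hp x (by simp [hx]))

-- one reset at most, when all elements lie in [c, c + m]
lemma pvG_le_one (m c : Int) : ∀ (xs : List Int) (l : Int),
    (∀ x ∈ xs, c ≤ x) → (∀ x ∈ xs, x ≤ c + m) → pvG m l xs ≤ 1 := by
  intro xs
  induction xs with
  | nil => intro l _ _; simp [pvG]
  | cons x xs ih =>
    intro l hlo hhi
    simp only [pvG]
    split_ifs with h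
    · have : pvG m x xs = 0 := by
        rw [pvG_eq_zero_iff]
        intro y hy
        have h1 := hhi y (by simp [hy])
        have h2 := hlo x (by simp)
        omega
      omega
    · exact ih l (fun y hy => hlo y (by simp [hy])) (fun y hy => hhi y (by simp [hy]))

lemma pvG_decomp (m : Int) : ∀ (xs : List Int) (l : Int), pvG m l xs ≤ 1 →
    (∀ x ∈ xs, x - l ≤ m) ∨
    ∃ p b s, xs = p ++ b :: s ∧ (∀ x ∈ p, x - l ≤ m) ∧ b - l > m ∧ (∀ x ∈ s, x - b ≤ m) := by
  intro xs
  induction xs with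
  | nil => intro l _; left; simp
  | cons x xs ih =>
    intro l h
    simp only [pvG] at h
    split_ifs at h with hx
    · right
      refine ⟨[], x, xs, by simp, by simp, hx, ?_⟩
      have : pvG m x xs = 0 := by have := pvG_nonneg m x xs; omega
      exact (pvG_eq_zero_iff m x xs).mp this
    · rcases ih l h with hall | ⟨p, b, s, heq, hp, hb, hs⟩
      · left
        intro y hy; rcases List.mem_cons.mp hy with rfl | hy
        · omega
        · exact hall y hy
      · right
        refine ⟨x :: p, b, s, by simp [heq], ?_, hb, hs⟩
        intro y hy; rcases List.mem_cons.mp hy with rfl | hy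
        · omega
        · exact hp y hy

-- the pair (last of p, b) is adjacent in p ++ b :: s
lemma pvZipTail_mem : ∀ (p : List Int) (hp : p ≠ []) (b : Int) (s : List Int),
    (p.getLast hp, b) ∈ (p ++ b :: s).zip ((p ++ b :: s).tail) := by
  intro p
  induction p with
  | nil => intro hp; exact absurd rfl hp
  | cons u p ih =>
    intro _ b s
    cases p with
    | nil => simp [List.zip]
    | cons v p =>
      have h := ih (by simp) b s
      simp only [List.getLast_cons (by simp : v :: p ≠ [])] at *
      simp only [List.cons_append, List.tail_cons, List.zip]
      right
      simpa [List.zip] using h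

-- a member of zip xs xs.tail is an adjacent pair of xs
lemma pvZipTail_decomp : ∀ (xs : List Int) (q : Int × Int), q ∈ xs.zip xs.tail →
    ∃ pre suf, xs = pre ++ q.1 :: q.2 :: suf := by
  intro xs
  induction xs with
  | nil => intro q hq; simp [List.zip] at hq
  | cons u rest ih =>
    intro q hq
    cases rest with
    | nil => simp [List.zip] at hq
    | cons v rest' =>
      simp only [List.tail_cons, List.zip, List.zipWith_cons_cons, List.mem_cons] at hq
      rcases hq with rfl | hq
      · exact ⟨[], rest', by simp⟩
      · obtain ⟨pre, suf, heq⟩ := ih q (by simpa [List.zip] using hq)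
        exact ⟨u :: pre, suf, by simp [heq]⟩

lemma pvSorted_le_getLast : ∀ (xs : List Int) (h : xs ≠ []), xs.Pairwise (· ≤ ·) →
    ∀ x ∈ xs, x ≤ xs.getLast h := by
  intro xs
  induction xs with
  | nil => intro h; exact absurd rfl h
  | cons u rest ih =>
    intro _ hs x hx
    cases rest with
    | nil => simp at hx; simp [hx]
    | cons v rest' =>
      rw [List.getLast_cons (by simp : v :: rest' ≠ [])]
      rcases List.mem_cons.mp hx with rfl | hx
      · exact (List.pairwise_cons.mp hs).1 _ (List.getLast_mem (by simp))
      · exact ih (by simp) (List.pairwise_cons.mp hs).2 x hx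

-- generic facts about B's running-minimum fold
lemma pvFoldMin_le_iff (f : Int × Int → Int) (mval : Int) :
    ∀ (l : List (Int × Int)) (i : Int),
    (l.foldl (fun b p => if f p < b then f p else b) i) ≤ mval ↔ i ≤ mval ∨ ∃ p ∈ l, f p ≤ mval := by
  intro l
  induction l with
  | nil => intro i; simp
  | cons q l ih =>
    intro i
    simp only [List.foldl_cons]
    split_ifs with h
    · rw [ih]
      constructor
      · rintro (h1 | h1)
        · exact Or.inr ⟨q, by simp, h1⟩
        · obtain ⟨p, hp, hple⟩ := h1; exact Or.inr ⟨p, by simp [hp], hple⟩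
      · rintro (h1 | ⟨p, hp, hple⟩)
        · left; omega
        · rcases List.mem_cons.mp hp with rfl | hp
          · left; exact hple
          · right; exact ⟨p, hp, hple⟩
    · rw [ih]
      constructor
      · rintro (h1 | h1)
        · exact Or.inl h1
        · obtain ⟨p, hp, hple⟩ := h1; exact Or.inr ⟨p, by simp [hp], hple⟩
      · rintro (h1 | ⟨p, hp, hple⟩)
        · exact Or.inl h1
        · rcases List.mem_cons.mp hp with rfl | hp
          · left; omega
          · right; exact ⟨p, hp, hple⟩

lemma pvFoldMin_le_init (f : Int × Int → Int) :
    ∀ (l : List (Int × Int)) (i : Int),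
    (l.foldl (fun b p => if f p < b then f p else b) i) ≤ i := by
  intro l
  induction l with
  | nil => intro i; simp
  | cons q l ih =>
    intro i
    simp only [List.foldl_cons]
    split_ifs with h
    · exact le_trans (ih (f q)) (by omega)
    · exact ih i

-- the characterization: for a sorted nonempty list and m ≥ 1, A's cover check succeeds
-- exactly when the whole span fits or some adjacent split gives both groups span ≤ m
lemma pvMain_iff (As : List Int) (hne : As ≠ []) (hs : As.Pairwise (· ≤ ·)) (m : Int) (hm : 1 ≤ m) :
    pvCanCover As m ≤ 1 ↔
    (As.getLast hne - As.headD 0 ≤ m ∨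
     ∃ p ∈ As.zip As.tail, max (p.1 - As.headD 0) (As.getLast hne - p.2) ≤ m) := by
  obtain ⟨a, rest, rfl⟩ := List.exists_cons_of_ne_nil hne
  rw [pvCanCover_eq, PySem.List.pyGetD_zero]
  simp only [List.getD_cons_zero, List.headD_cons]
  constructor
  · intro h
    rcases pvG_decomp m (a :: rest) a h with hall | ⟨p, b, s, heq, hp, hb, hsuf⟩
    · left
      have := hall ((a :: rest).getLast hne) (List.getLast_mem hne)
      omega
    · right
      have hpne : p ≠ [] := by
        rintro rfl
        simp only [List.nil_append] at heq
        injection heq with h1 h2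
        omega
      refine ⟨(p.getLast hpne, b), ?_, ?_⟩
      · rw [heq]; exact pvZipTail_mem p hpne b s
      · have h1 : p.getLast hpne - a ≤ m := hp _ (List.getLast_mem hpne)
        have h2 : (a :: rest).getLast hne - b ≤ m := by
          generalize hgl : (a :: rest).getLast hne = gl
          have hmem : gl ∈ a :: rest := hgl ▸ List.getLast_mem hne
          rw [heq] at hmem
          rcases List.mem_append.mp hmem with hmem | hmem
          · -- the last element of the whole list lies in the prefix: impossible unless ≤ b anyway
            have hle : (a :: rest).getLast hne ≤ b + m := by
              have := hp _ hmem
              omega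
            omega
          · rcases List.mem_cons.mp hmem with hl | hl
            · omega
            · have := hsuf _ hl; omega
        simp only [max_le_iff]
        exact ⟨h1, h2⟩
  · intro h
    rcases h with h | ⟨q, hq, hqle⟩
    · have : pvG m a (a :: rest) = 0 := by
        rw [pvG_eq_zero_iff]
        intro x hx
        have := pvSorted_le_getLast (a :: rest) hne hs x hx
        have ha : a ≤ x := by
          rcases List.mem_cons.mp hx with rfl | hx
          · omega
          · exact (List.pairwise_cons.mp hs).1 x hx
        omega
      omega
    · obtain ⟨pre, suf, heq⟩ := pvZipTail_decomp (a :: rest) q hq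
      simp only [max_le_iff] at hqle
      obtain ⟨hx, hy⟩ := hqle
      have hsAll : (a :: rest).Pairwise (· ≤ ·) := hs
      rw [heq] at hsAll
      have hsplit := List.pairwise_append.mp hsAll
      -- every element of pre ++ [q.1] is ≤ a + m
      have hprefix : ∀ x ∈ pre ++ [q.1], x - a ≤ m := by
        intro x hxmem
        rcases List.mem_append.mp hxmem with hxm | hxm
        · have hxq : x ≤ q.1 := hsplit.2.2 x hxm q.1 (by simp)
          have hax : a ≤ x := by
            have hmem : x ∈ a :: rest := by rw [heq]; exact List.mem_append.mpr (Or.inl hxm)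
            rcases List.mem_cons.mp hmem with rfl | hxr
            · omega
            · exact (List.pairwise_cons.mp hs).1 x hxr
          omega
        · simp at hxm; omega
      have hstep : pvG m a (a :: rest) = pvG m a (q.2 :: suf) := by
        rw [heq, show pre ++ q.1 :: q.2 :: suf = (pre ++ [q.1]) ++ q.2 :: suf by simp]
        exact pvG_skip m a _ _ hprefix
      rw [hstep]
      apply pvG_le_one m q.2
      · intro x hxm
        rcases List.mem_cons.mp hxm with rfl | hxm
        · omega
        · exact (List.pairwise_cons.mp (List.pairwise_cons.mp hsplit.2.1).2).1 x hxm
      · intro x hxm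
        have hmem : x ∈ a :: rest := by
          rw [heq]
          exact List.mem_append.mpr (Or.inr (List.mem_cons.mpr (Or.inr hxm)))
        have := pvSorted_le_getLast (a :: rest) hne hs x hmem
        omega

-- the binary-search loop computes the least m ≥ 1 satisfying the (monotone) check
lemma pvSearch_eq (As : List Int) (T : Int)
    (hchar : ∀ m, 1 ≤ m → (pvCanCover As m ≤ 1 ↔ T ≤ m)) :
    ∀ (n : Nat) (low high : Int), (high - low).toNat ≤ n →
      1 ≤ low → low ≤ T → T ≤ high → pvSearch As low high = T := by
  intro n
  induction n with
  | zero =>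
    intro low high hn h1 h2 h3
    rw [pvSearch]
    rw [dif_neg (by omega : ¬ low < high)]
    omega
  | succ n ih =>
    intro low high hn h1 h2 h3
    rw [pvSearch]
    by_cases hlt : low < high
    · rw [dif_pos hlt]
      have hb := PySem.Int.floordiv_two_mid_bounds (lo := low) (hi := high) (by omega)
      have hlo : low ≤ PySem.Int.floordiv (low + high) 2 := hb.1
      have hhi : PySem.Int.floordiv (low + high) 2 < high :=
        (PySem.Int.floordiv_lt_iff_lt_mul (by omega : (0:Int) < 2)).mpr (by omega)
      set mid := PySem.Int.floordiv (low + high) 2 with hmid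
      simp only []
      by_cases hc : pvCanCover As mid ≤ 1
      · rw [if_pos hc]
        have hTm : T ≤ mid := (hchar mid (by omega)).mp hc
        exact ih low mid (by omega) h1 h2 hTm
      · rw [if_neg hc]
        have hTm : ¬ T ≤ mid := fun hTle => hc ((hchar mid (by omega)).mpr hTle)
        exact ih (mid + 1) high (by omega) (by omega) (by omega) h3
    · rw [dif_neg hlt]
      omega

-- ===== VERDICT (by name: the statement is the Claim_ definition above) =====
theorem solution_spec : Claim_equal_solution := by
  intro A _ hpre
  unfold Spec_solution solution solution_alt
  set As := PySem.List.sorted A (fun x => x) with hAsdef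
  have hAne : As ≠ [] := by
    intro h
    exact hpre ((PySem.List.sorted_eq_nil_iff A (fun x => x) false).mp h)
  have hs : As.Pairwise (· ≤ ·) := by
    have := PySem.List.sorted_pairwise A (fun x => x)
    simpa using this
  obtain ⟨a, rest, hAs⟩ := List.exists_cons_of_ne_nil hAne
  simp only []
  by_cases hlen : As.length < 2
  · -- singleton list: the loop range is [1, 1) and both return 1
    rw [if_pos hlen]
    cases rest with
    | cons _ _ => rw [hAs] at hlen; simp at hlen
    | nil =>
      rw [hAs]
      rw [PySem.List.pyGetD_neg_one _ _ (by simp)]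
      simp only [List.getLast_singleton, PySem.List.pyGetD_zero, List.getD_cons_zero]
      rw [pvSearch]
      rw [dif_neg (by omega : ¬ (1:Int) < a - a + 1)]
  · rw [if_neg hlen]
    rw [PySem.List.pyGetD_neg_one _ _ hAne, PySem.List.pyGetD_zero, PySem.List.slice_from_one]
    set z := As.getLast hAne with hz
    set aa := As.getD 0 0 with haa
    have haa' : As.headD 0 = aa := by rw [hAs]; simp [haa, hAs]
    set f : Int × Int → Int := fun p => max (p.1 - aa) (z - p.2) with hf
    set best := (As.zip As.tail).foldl (fun b p => if f p < b then f p else b) (z - aa) with hbest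
    have haz : aa ≤ z := by
      have := pvSorted_le_getLast As hAne hs aa (by rw [hAs, haa, hAs]; simp)
      omega
    have hbestle : best ≤ z - aa := pvFoldMin_le_init f (As.zip As.tail) (z - aa)
    have hchar : ∀ m, 1 ≤ m → (pvCanCover As m ≤ 1 ↔ max 1 best ≤ m) := by
      intro m hm
      rw [pvMain_iff As hAne hs m hm, haa']
      rw [show (max 1 best ≤ m) ↔ (best ≤ m) by omega]
      rw [hbest, pvFoldMin_le_iff f m (As.zip As.tail) (z - aa)]
    exact pvSearch_eq As (max 1 best) hchar (z - aa + 1 - 1).toNat 1 (z - aa + 1)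
      (by omega) (by omega) (by omega) (by omega)
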